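-- pv_equiv track=rewrite | github.com/BcruzUC/ICS1113-Proyecto | MiscFunctions.py | tuple_gen
-- ===== SOURCE A (Python) =====
-- def tuple_gen(_list):
--     tuple_list = []
--     for first in _list:
--         for second in _list:
--             tupla = (first, second)
--             if tupla not in tuple_list:
--                 if first == second:
--                     tuple_list.insert(0, tupla)
--                 else:
--                     tuple_list.append(tupla)
--     return tuple_list
-- ===== SOURCE B (Python) =====
-- def tuple_gen(_list):
--     # dedupe once up front, then emit diagonal pairs (reversed) followed by off-diagonal pairs
--     uniq = list(dict.fromkeys(_list))
--     front = [(u, u) for u in reversed(uniq)]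
--     back = [(a, b) for a in uniq for b in uniq if a != b]
--     return front + back
-- ===== Notes on version B (the rewrite author's own statement) =====
-- stated objective: faster
-- what changed: Instead of scanning the growing output list for every candidate pair and interleaving insert(0)/append, B dedupes the input once with dict.fromkeys and then directly builds the reversed diagonal block plus the off-diagonal block by comprehensions over the unique values.
import Mathlib
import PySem

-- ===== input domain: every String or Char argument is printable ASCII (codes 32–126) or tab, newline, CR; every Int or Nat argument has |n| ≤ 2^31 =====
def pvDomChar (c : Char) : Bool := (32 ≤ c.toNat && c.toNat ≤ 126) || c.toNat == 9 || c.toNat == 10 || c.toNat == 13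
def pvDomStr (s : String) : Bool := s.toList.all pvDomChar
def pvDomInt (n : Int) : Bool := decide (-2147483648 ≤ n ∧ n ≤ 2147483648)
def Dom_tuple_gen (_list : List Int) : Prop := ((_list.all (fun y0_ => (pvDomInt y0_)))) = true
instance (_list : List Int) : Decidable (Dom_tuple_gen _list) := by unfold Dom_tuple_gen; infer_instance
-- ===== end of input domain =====

-- B replaces A's per-pair membership scan of the output by a single up-front dedup of the
-- input followed by direct construction of the diagonal (reversed) and off-diagonal parts.

-- ===== PORT A =====
-- inner-loop body of A: membership test on the output list, then insert-at-front / append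
def tgStep (first : Int) (acc : List (Int × Int)) (second : Int) : List (Int × Int) :=
  if (first, second) ∈ acc then acc
  else if first = second then (first, second) :: acc
  else acc ++ [(first, second)]

def tuple_gen (_list : List Int) : List (Int × Int) :=
  _list.foldl (fun acc first => _list.foldl (tgStep first) acc) []

-- ===== PORT B =====
def tuple_gen_alt (_list : List Int) : List (Int × Int) :=
  let uniq := PySem.List.dedup _list          -- list(dict.fromkeys(_list))
  let front := uniq.reverse.map (fun u => (u, u))
  let back := uniq.flatMap (fun a => (uniq.filter (fun b => decide (a ≠ b))).map (fun b => (a, b)))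
  front ++ back

-- ===== PRECONDITION & SPEC =====
def Spec_tuple_gen (_list : List Int) (out : List (Int × Int)) : Prop := out = tuple_gen_alt _list
instance (_list : List Int) (out : List (Int × Int)) : Decidable (Spec_tuple_gen _list out) := by unfold Spec_tuple_gen; infer_instance

-- ===== CLAIM (what is proved, stated in full; the proofs are below) =====
def Claim_equal_tuple_gen : Prop := ∀ (_list : List Int), Dom_tuple_gen _list → Spec_tuple_gen _list (tuple_gen _list)

-- ===== LEMMAS AND PROOFS =====

-- first-occurrence dedup of L relative to an already-seen list
def fdedup (seen : List Int) : List Int → List Int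
  | [] => []
  | x :: xs => if x ∈ seen then fdedup seen xs else x :: fdedup (seen ++ [x]) xs

lemma mem_fdedup (x : Int) : ∀ (L S : List Int), x ∈ fdedup S L ↔ x ∈ L ∧ x ∉ S := by
  intro L
  induction L with
  | nil => intro S; simp [fdedup]
  | cons y ys ih =>
    intro S
    by_cases hy : y ∈ S
    · simp only [fdedup, if_pos hy, ih]
      constructor
      · rintro ⟨h1, h2⟩; exact ⟨List.mem_cons_of_mem _ h1, h2⟩
      · rintro ⟨h1, h2⟩
        rcases List.mem_cons.1 h1 with rfl | h1
        · exact absurd hy h2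
        · exact ⟨h1, h2⟩
    · simp only [fdedup, if_neg hy, List.mem_cons, ih, List.mem_append]
      constructor
      · rintro (rfl | ⟨h1, h2⟩)
        · exact ⟨Or.inl rfl, hy⟩
        · exact ⟨Or.inr h1, fun hx => h2 (Or.inl hx)⟩
      · rintro ⟨h1, h2⟩
        by_cases hxy : x = y
        · exact Or.inl hxy
        · rcases h1 with rfl | h1
          · exact Or.inl rfl
          · refine Or.inr ⟨h1, fun h => ?_⟩
            rcases h with h | h
            · exact h2 h
            · simp at h
              exact hxy h

lemma fdedup_foldl_add : ∀ (L P : List Int),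
    P ++ fdedup P L = List.foldl PySem.Set.add P L := by
  intro L
  induction L with
  | nil => intro P; simp [fdedup]
  | cons x xs ih =>
    intro P
    by_cases hx : x ∈ P
    · have hadd : PySem.Set.add P x = P := by
        simp [PySem.Set.add, PySem.Set.contains, hx]
      simp [fdedup, if_pos hx, List.foldl_cons, hadd, ih]
    · have hadd : PySem.Set.add P x = P ++ [x] := by
        simp [PySem.Set.add, PySem.Set.contains, hx]
      calc P ++ fdedup P (x :: xs) = (P ++ [x]) ++ fdedup (P ++ [x]) xs := by
            simp [fdedup, if_neg hx]
        _ = List.foldl PySem.Set.add (P ++ [x]) xs := ih _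
        _ = List.foldl PySem.Set.add P (x :: xs) := by simp [List.foldl_cons, hadd]

lemma fdedup_eq_dedup (xs : List Int) : fdedup [] xs = PySem.List.dedup xs := by
  have h := fdedup_foldl_add xs []
  simp only [List.nil_append] at h
  rw [h, PySem.List.dedup_eq_ofList, PySem.Set.ofList_eq_foldl]

-- the invariant state of A's outer loop: P = distinct already-processed values in order,
-- U = distinct values of the whole input in first-occurrence order
def tgState (U P : List Int) : List (Int × Int) :=
  P.reverse.map (fun c => (c, c)) ++
  P.flatMap (fun c => (U.filter (fun b => decide (c ≠ b))).map (fun b => (c, b)))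

-- if every pair (a, b), b ∈ L, is already present, the inner loop is a no-op
lemma inner_noop (a : Int) : ∀ (L : List Int) (acc : List (Int × Int)),
    (∀ b ∈ L, (a, b) ∈ acc) → L.foldl (tgStep a) acc = acc := by
  intro L
  induction L with
  | nil => intro acc _; rfl
  | cons x xs ih =>
    intro acc h
    have hx : (a, x) ∈ acc := h x (List.mem_cons_self)
    simp only [List.foldl_cons, tgStep, if_pos hx]
    exact ih acc (fun b hb => h b (List.mem_cons_of_mem _ hb))

-- one full inner pass for a fresh value a, tracking the inner seen-list S
lemma inner_pass (a : Int) (F B : List (Int × Int))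
    (hF : ∀ b, (a, b) ∉ F) (hB : ∀ b, (a, b) ∉ B) :
    ∀ (L S : List Int),
    L.foldl (tgStep a)
      ((if a ∈ S then [(a, a)] else []) ++ F ++ B ++
        (S.filter (fun b => decide (a ≠ b))).map (fun b => (a, b)))
    = (if a ∈ S ∨ a ∈ L then [(a, a)] else []) ++ F ++ B ++
        (((S ++ fdedup S L).filter (fun b => decide (a ≠ b))).map (fun b => (a, b))) := by
  intro L
  induction L with
  | nil => intro S; simp [fdedup]
  | cons x xs ih =>
    intro S
    have hmem : ((a, x) ∈ (if a ∈ S then [(a, a)] else []) ++ F ++ B ++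
        (S.filter (fun b => decide (a ≠ b))).map (fun b => (a, b))) ↔ x ∈ S := by
      constructor
      · intro h
        rcases List.mem_append.1 h with h | h
        · rcases List.mem_append.1 h with h | h
          · rcases List.mem_append.1 h with h | h
            · by_cases haS : a ∈ S
              · simp only [if_pos haS, List.mem_singleton, Prod.mk.injEq] at h
                exact h.2.symm ▸ haS
              · simp [if_neg haS] at h
            · exact absurd h (hF x)
          · exact absurd h (hB x)
        · rcases List.mem_map.1 h with ⟨b, hb, hab⟩
          have : b = x := (Prod.ext_iff.1 hab).2
          subst this
          exact List.mem_of_mem_filter hb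
      · intro hxS
        by_cases hax : a = x
        · subst hax
          simp [if_pos hxS]
        · refine List.mem_append.2 (Or.inr ?_)
          exact List.mem_map.2 ⟨x, List.mem_filter.2 ⟨hxS, by simp [hax]⟩, rfl⟩
    by_cases hxS : x ∈ S
    · -- pair already present; inner step is a no-op, seen-list unchanged
      simp only [List.foldl_cons, tgStep, if_pos (hmem.2 hxS)]
      rw [ih S]
      have h1 : fdedup S (x :: xs) = fdedup S xs := by simp [fdedup, hxS]
      have h2 : (a ∈ S ∨ a ∈ x :: xs) ↔ (a ∈ S ∨ a ∈ xs) := by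
        constructor
        · rintro (h | h)
          · exact Or.inl h
          · rcases List.mem_cons.1 h with rfl | h
            · exact Or.inl hxS
            · exact Or.inr h
        · rintro (h | h)
          · exact Or.inl h
          · exact Or.inr (List.mem_cons_of_mem _ h)
      rw [h1]
      by_cases hc : a ∈ S ∨ a ∈ xs
      · rw [if_pos hc, if_pos (h2.2 hc)]
      · rw [if_neg hc, if_neg (fun h => hc (h2.1 h))]
    · -- x is new in this pass
      have hnot : ¬ ((a, x) ∈ (if a ∈ S then [(a, a)] else []) ++ F ++ B ++
          (S.filter (fun b => decide (a ≠ b))).map (fun b => (a, b))) :=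
        fun h => hxS (hmem.1 h)
      by_cases hax : a = x
      · -- diagonal pair: inserted at the front
        subst hax
        have haS : a ∉ S := hxS
        simp only [List.foldl_cons, tgStep, if_neg hnot, if_true]
        have hstep : ((a, a) :: ((if a ∈ S then [(a, a)] else []) ++ F ++ B ++
            (S.filter (fun b => decide (a ≠ b))).map (fun b => (a, b))))
            = (if a ∈ S ++ [a] then [(a, a)] else []) ++ F ++ B ++
              ((S ++ [a]).filter (fun b => decide (a ≠ b))).map (fun b => (a, b)) := by
          simp [if_neg haS, List.filter_append]
        rw [hstep, ih (S ++ [a])]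
        have h1 : fdedup S (a :: xs) = a :: fdedup (S ++ [a]) xs := by
          simp [fdedup, haS]
        have h2 : S ++ fdedup S (a :: xs) = (S ++ [a]) ++ fdedup (S ++ [a]) xs := by
          rw [h1]; simp
        rw [h2]
        have hl : a ∈ S ++ [a] ∨ a ∈ xs := Or.inl (by simp)
        have hr : a ∈ S ∨ a ∈ a :: xs := Or.inr (by simp)
        rw [if_pos hl, if_pos hr]
      · -- off-diagonal pair: appended at the back
        simp only [List.foldl_cons, tgStep, if_neg hnot, if_neg hax]
        have hstep : (((if a ∈ S then [(a, a)] else []) ++ F ++ B ++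
            (S.filter (fun b => decide (a ≠ b))).map (fun b => (a, b))) ++ [(a, x)])
            = (if a ∈ S ++ [x] then [(a, a)] else []) ++ F ++ B ++
              ((S ++ [x]).filter (fun b => decide (a ≠ b))).map (fun b => (a, b)) := by
          have hif : (a ∈ S ++ [x]) ↔ a ∈ S := by
            simp only [List.mem_append, List.mem_singleton]
            exact ⟨fun h => h.elim id (fun h => absurd h hax), Or.inl⟩
          have : (if a ∈ S ++ [x] then [(a, a)] else []) = (if a ∈ S then [(a, a)] else []) := by
            by_cases h : a ∈ S
            · rw [if_pos h, if_pos (hif.2 h)]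
            · rw [if_neg h, if_neg (fun hh => h (hif.1 hh))]
          simp [List.filter_append, hax]
        rw [hstep, ih (S ++ [x])]
        have h2 : S ++ fdedup S (x :: xs) = (S ++ [x]) ++ fdedup (S ++ [x]) xs := by
          simp [fdedup, hxS]
        rw [h2]
        have hif : (a ∈ S ++ [x] ∨ a ∈ xs) ↔ (a ∈ S ∨ a ∈ x :: xs) := by
          simp only [List.mem_append, List.mem_cons]
          tauto
        by_cases hc : a ∈ S ++ [x] ∨ a ∈ xs
        · rw [if_pos hc, if_pos (hif.1 hc)]
        · rw [if_neg hc, if_neg (fun h => hc (hif.2 h))]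

-- the outer loop moves the state from P to P ++ (new distinct values of L)
lemma outer_pass (all : List Int) : ∀ (L P : List Int), (∀ x ∈ L, x ∈ all) →
    L.foldl (fun acc a => all.foldl (tgStep a) acc) (tgState (fdedup [] all) P)
    = tgState (fdedup [] all) (P ++ fdedup P L) := by
  intro L
  induction L with
  | nil => intro P _; simp [fdedup]
  | cons a L' ih =>
    intro P hsub
    have haall : a ∈ all := hsub a List.mem_cons_self
    have hsub' : ∀ x ∈ L', x ∈ all := fun x hx => hsub x (List.mem_cons_of_mem _ hx)
    by_cases haP : a ∈ P
    · -- a already processed: inner loop is a no-op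
      have hnoop : all.foldl (tgStep a) (tgState (fdedup [] all) P)
          = tgState (fdedup [] all) P := by
        apply inner_noop
        intro b hb
        by_cases hab : a = b
        · subst hab
          exact List.mem_append.2 (Or.inl (List.mem_map.2
            ⟨a, List.mem_reverse.2 haP, rfl⟩))
        · refine List.mem_append.2 (Or.inr ?_)
          refine List.mem_flatMap.2 ⟨a, haP, ?_⟩
          refine List.mem_map.2 ⟨b, List.mem_filter.2 ⟨?_, by simp [hab]⟩, rfl⟩
          exact (mem_fdedup b all []).2 ⟨hb, by simp⟩
      simp only [List.foldl_cons, hnoop]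
      rw [ih P hsub']
      have : fdedup P (a :: L') = fdedup P L' := by simp [fdedup, haP]
      rw [this]
    · -- a is fresh: one full inner pass adds its row
      have hF : ∀ b, ((a, b) : Int × Int) ∉ P.reverse.map (fun c => (c, c)) := by
        intro b h
        rcases List.mem_map.1 h with ⟨c, hc, hcc⟩
        have : a = c := (Prod.ext_iff.1 hcc).1.symm
        exact haP (this ▸ List.mem_reverse.1 hc)
      have hB : ∀ b, ((a, b) : Int × Int) ∉ P.flatMap (fun c =>
          ((fdedup [] all).filter (fun b => decide (c ≠ b))).map (fun b => (c, b))) := by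
        intro b h
        rcases List.mem_flatMap.1 h with ⟨c, hc, hmem⟩
        rcases List.mem_map.1 hmem with ⟨b', _, hbb⟩
        have : a = c := (Prod.ext_iff.1 hbb).1.symm
        exact haP (this ▸ hc)
      have hpass := inner_pass a (P.reverse.map (fun c => (c, c)))
        (P.flatMap (fun c => ((fdedup [] all).filter (fun b => decide (c ≠ b))).map
          (fun b => (c, b)))) hF hB all []
      have hif1 : (if a ∈ ([] : List Int) then [(a, a)] else []) = ([] : List (Int × Int)) :=
        if_neg (by simp)
      have hif2 : (if a ∈ ([] : List Int) ∨ a ∈ all then [(a, a)] else []) = [(a, a)] :=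
        if_pos (Or.inr haall)
      rw [hif1, hif2] at hpass
      simp only [List.filter_nil, List.map_nil, List.nil_append, List.append_nil] at hpass
      have hstate : all.foldl (tgStep a) (tgState (fdedup [] all) P)
          = tgState (fdedup [] all) (P ++ [a]) := by
        unfold tgState
        rw [hpass]
        simp [List.flatMap_append, List.append_assoc]
      simp only [List.foldl_cons, hstate]
      rw [ih (P ++ [a]) hsub']
      have : P ++ fdedup P (a :: L') = (P ++ [a]) ++ fdedup (P ++ [a]) L' := by
        simp [fdedup, haP]
      rw [this]

-- ===== VERDICT (by name: the statement is the Claim_ definition above) =====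
theorem tuple_gen_spec : Claim_equal_tuple_gen := by
  intro _list _
  unfold Spec_tuple_gen tuple_gen tuple_gen_alt
  have h0 : (([] : List (Int × Int))) = tgState (fdedup [] _list) [] := by
    simp [tgState]
  rw [h0, outer_pass _list _list [] (fun x hx => hx)]
  rw [← fdedup_eq_dedup]
  simp only [List.nil_append]
  have : fdedup [] _list = fdedup ([] : List Int) _list := rfl
  unfold tgState
  rfl
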